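-- pv_equiv track=rewrite | github.com/bizyumov/yandex-office | disk/scripts/download.py | _parent_dir_paths
-- ===== SOURCE A (Python) =====
-- def _parent_dir_paths(path: str) -> list[str]:
--     if ":" not in path:
--         raise ValueError(f"Unsupported Disk path: {path}")
--     scheme, remainder = path.split(":", 1)
--     parts = [part for part in remainder.lstrip("/").split("/") if part]
--     if len(parts) <= 1:
--         return []
--     parents: list[str] = []
--     current: list[str] = []
--     for part in parts[:-1]:
--         current.append(part)
--         parents.append(f"{scheme}:/" + "/".join(current))
--     return parents
-- ===== SOURCE B (Python) =====
-- def _parent_dir_paths(path: str) -> list[str]: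
--     if ":" not in path:
--         raise ValueError(f"Unsupported Disk path: {path}")
--     scheme, remainder = path.split(":", 1)
--     parts = [part for part in remainder.lstrip("/").split("/") if part]
--     if len(parts) <= 1:
--         return []
--     # build the deepest parent once, then walk upwards by truncating at the last '/'
--     cur = f"{scheme}:/" + "/".join(parts[:-1])
--     out: list[str] = []
--     for _ in range(len(parts) - 1):
--         out.append(cur)
--         cur = cur.rsplit("/", 1)[0]
--     out.reverse()
--     return out
-- ===== Notes on version B (the rewrite author's own statement) =====
-- stated objective: alternative
-- what changed: B builds the deepest parent path string once and derives the ancestors top-down by repeatedly truncating at the last '/', reversing at the end, instead of A's bottom-up growing segment accumulator with a '/'.join per step.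
import Mathlib
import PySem

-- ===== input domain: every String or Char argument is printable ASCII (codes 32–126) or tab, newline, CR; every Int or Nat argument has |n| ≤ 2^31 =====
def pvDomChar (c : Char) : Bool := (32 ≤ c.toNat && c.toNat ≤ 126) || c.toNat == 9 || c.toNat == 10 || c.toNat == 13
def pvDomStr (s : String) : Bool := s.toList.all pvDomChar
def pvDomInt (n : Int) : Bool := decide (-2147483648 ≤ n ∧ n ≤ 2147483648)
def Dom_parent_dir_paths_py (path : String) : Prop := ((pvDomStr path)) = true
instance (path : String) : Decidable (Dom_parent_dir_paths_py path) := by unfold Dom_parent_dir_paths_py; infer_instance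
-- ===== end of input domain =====

-- B builds the deepest parent path once and derives the ancestors by truncating at the
-- last '/' (top-down after a reverse), instead of A's growing-prefix accumulator with a
-- join per step; same return value on every path containing ':'.

-- ===== PORT A =====
def parent_dir_paths_py (path : String) : List String :=
  if PySem.Str.isIn ":" path = true then
    match PySem.Chars.splitOnMax path.toList [':'] 1 with
    | [scheme, remainder] =>
        -- parts = [part for part in remainder.lstrip("/").split("/") if part]
        let parts := (PySem.Chars.splitOn (remainder.dropWhile (fun c => c == '/')) ['/']).filter
          (fun p => !p.isEmpty)
        if parts.length ≤ 1 then []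
        else
          ((parts.dropLast).foldl
            (fun (st : List (List Char) × List String) part =>
              let cur := st.1 ++ [part]
              (cur, st.2 ++ [String.ofList (scheme ++ [':', '/'] ++ PySem.Chars.join ['/'] cur)]))
            ([], [])).2
    | _ => []
  else []  -- Python raises ValueError here; excluded by Pre_

-- ===== PORT B =====
-- hand port of cs.rsplit('/', 1)[0]: everything before the LAST '/', or cs unchanged if none (exact)
def rsplitHeadSlash (cs : List Char) : List Char :=
  if '/' ∈ cs then ((cs.reverse.dropWhile (fun c => c != '/')).tail).reverse else cs

-- the 'for _ in range(j): out.append(cur); cur = cur.rsplit("/", 1)[0]' loop of Source B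
def truncLoop (j : Nat) (out : List String) (cur : List Char) : List String :=
  match j with
  | 0 => out
  | j + 1 => truncLoop j (out ++ [String.ofList cur]) (rsplitHeadSlash cur)

def parent_dir_paths_py_alt (path : String) : List String :=
  if PySem.Str.isIn ":" path = true then
    match PySem.Chars.splitOnMax path.toList [':'] 1 with
    | [] => []
    | scheme :: rest =>
      match rest with
      | [] => []
      | remainder :: rest2 =>
        match rest2 with
        | _ :: _ => []
        | [] =>
        let parts := (PySem.Chars.splitOn (remainder.dropWhile (fun c => c == '/')) ['/']).filter
          (fun p => !p.isEmpty)
        if parts.length ≤ 1 then []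
        else
          let full := scheme ++ [':', '/'] ++ PySem.Chars.join ['/'] parts.dropLast
          (truncLoop (parts.length - 1) [] full).reverse
  else []

-- ===== PRECONDITION & SPEC =====
-- A raises ValueError when path contains no ':'; exactly those inputs are excluded.
def Pre_parent_dir_paths_py (path : String) : Prop := PySem.Str.isIn ":" path = true
instance (path : String) : Decidable (Pre_parent_dir_paths_py path) := by
  unfold Pre_parent_dir_paths_py; infer_instance
def pvWitness_parent_dir_paths_py : String := "disk:/a/b/c"

def Spec_parent_dir_paths_py (path : String) (out : List String) : Prop :=
  out = parent_dir_paths_py_alt path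
instance (path : String) (out : List String) : Decidable (Spec_parent_dir_paths_py path out) := by
  unfold Spec_parent_dir_paths_py; infer_instance

-- ===== CLAIM (what is proved, stated in full; the proofs are below) =====
def Claim_equal_parent_dir_paths_py : Prop := ∀ (path : String), Dom_parent_dir_paths_py path →
  Pre_parent_dir_paths_py path → Spec_parent_dir_paths_py path (parent_dir_paths_py path)

-- ===== LEMMAS AND PROOFS =====

-- the full path at depth k
def pvFull (scheme : List Char) (parts' : List (List Char)) (k : Nat) : List Char :=
  scheme ++ [':', '/'] ++ PySem.Chars.join ['/'] (parts'.take k)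

-- every piece produced by splitOn on '/' is '/'-free
theorem splitOn_go_noSlash : ∀ (fuel : Nat) (l cur : List Char) (acc : List (List Char)),
    l.length < fuel → (∀ c ∈ cur, c ≠ '/') → (∀ p ∈ acc, '/' ∉ p) →
    ∀ p ∈ PySem.Chars.splitOn.go ['/'] fuel l cur acc, '/' ∉ p := by
  intro fuel
  induction fuel with
  | zero => intro l cur acc hlen; omega
  | succ fuel ih =>
    intro l cur acc hlen hcur hacc
    cases l with
    | nil =>
      have hgo : PySem.Chars.splitOn.go ['/'] (fuel + 1) [] cur acc
          = (cur.reverse :: acc).reverse := rfl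
      rw [hgo]
      intro p hpmem
      rw [List.mem_reverse] at hpmem
      rcases List.mem_cons.mp hpmem with h | h
      · subst h
        intro hc
        exact hcur _ (List.mem_reverse.mp hc) rfl
      · exact hacc _ h
    | cons c rest =>
      have hgo : PySem.Chars.splitOn.go ['/'] (fuel + 1) (c :: rest) cur acc
          = if List.isPrefixOf ['/'] (c :: rest) = true then
              PySem.Chars.splitOn.go ['/'] fuel rest [] (cur.reverse :: acc)
            else PySem.Chars.splitOn.go ['/'] fuel rest (c :: cur) acc := rfl
      rw [hgo]
      by_cases hpre : List.isPrefixOf ['/'] (c :: rest) = true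
      · rw [if_pos hpre]
        apply ih
        · simp at hlen; omega
        · intro c hc; simp at hc
        · intro p hp
          rcases List.mem_cons.mp hp with h | h
          · subst h
            intro hc
            exact hcur _ (List.mem_reverse.mp hc) rfl
          · exact hacc _ h
      · rw [if_neg hpre]
        have hc : c ≠ '/' := by
          simp [List.isPrefixOf] at hpre
          exact fun h => hpre h.symm
        apply ih
        · simp at hlen ⊢; omega
        · intro x hx
          rcases List.mem_cons.mp hx with h | h
          · subst h; exact hc
          · exact hcur _ h
        · exact hacc

theorem splitOn_noSlash (s : List Char) :
    ∀ p ∈ PySem.Chars.splitOn s ['/'], '/' ∉ p := by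
  unfold PySem.Chars.splitOn
  exact splitOn_go_noSlash (s.length + 1) s [] [] (by omega) (by simp) (by simp)

theorem join_append_single (xs : List (List Char)) (y : List Char) (h : xs ≠ []) :
    PySem.Chars.join ['/'] (xs ++ [y]) = PySem.Chars.join ['/'] xs ++ '/' :: y := by
  induction xs with
  | nil => exact absurd rfl h
  | cons a xs ih =>
    cases xs with
    | nil => simp [PySem.Chars.join_cons_cons, PySem.Chars.join_singleton]
    | cons b xs =>
      have ih' := ih (by simp)
      simp only [List.cons_append] at ih' ⊢
      rw [PySem.Chars.join_cons_cons, PySem.Chars.join_cons_cons, ih']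
      simp [List.append_assoc]

theorem rsplitHeadSlash_append (u v : List Char) (hv : '/' ∉ v) :
    rsplitHeadSlash (u ++ '/' :: v) = u := by
  have hmem : '/' ∈ u ++ '/' :: v := by simp
  have hdw : List.dropWhile (fun c => c != '/') v.reverse = [] := by
    rw [List.dropWhile_eq_nil_iff]
    intro x hx
    simp only [ne_eq, bne_iff_ne]
    intro hxe
    exact hv (by rw [← hxe]; exact List.mem_reverse.mp hx)
  simp only [rsplitHeadSlash, if_pos hmem, List.reverse_append, List.reverse_cons,
    List.append_assoc]
  rw [List.dropWhile_append]
  simp [hdw]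

theorem rsplit_pvFull (scheme : List Char) (parts' : List (List Char))
    (hp : ∀ p ∈ parts', '/' ∉ p) (k : Nat) (h2 : 2 ≤ k) (hk : k ≤ parts'.length) :
    rsplitHeadSlash (pvFull scheme parts' k) = pvFull scheme parts' (k - 1) := by
  obtain ⟨j, rfl⟩ : ∃ j, k = j + 1 := ⟨k - 1, by omega⟩
  have hklt : j < parts'.length := by omega
  have htake : parts'.take (j + 1) = parts'.take j ++ [parts'[j]] :=
    List.take_succ_eq_append_getElem hklt
  have hne : parts'.take j ≠ [] := by
    have hl : (parts'.take j).length = j := by rw [List.length_take]; omega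
    intro hnil; rw [hnil] at hl; simp at hl; omega
  have hlast : '/' ∉ parts'[j] := hp _ (List.getElem_mem hklt)
  have hdec : pvFull scheme parts' (j + 1)
      = (scheme ++ [':', '/'] ++ PySem.Chars.join ['/'] (parts'.take j)) ++ '/' :: parts'[j] := by
    unfold pvFull
    rw [htake, join_append_single _ _ hne]
    simp [List.append_assoc]
  rw [hdec, rsplitHeadSlash_append _ _ hlast]
  unfold pvFull
  simp

theorem foldA (scheme : List Char) : ∀ (l : List (List Char)) (c : List (List Char)) (acc : List String),
    (l.foldl (fun (st : List (List Char) × List String) part =>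
        let cur := st.1 ++ [part]
        (cur, st.2 ++ [String.ofList (scheme ++ [':', '/'] ++ PySem.Chars.join ['/'] cur)]))
      (c, acc)).2
    = acc ++ (List.range l.length).map
        (fun k => String.ofList (scheme ++ [':', '/'] ++ PySem.Chars.join ['/'] (c ++ l.take (k + 1)))) := by
  intro l
  induction l with
  | nil => intro c acc; simp
  | cons a l ih =>
    intro c acc
    simp only [List.foldl_cons, List.length_cons]
    rw [ih]
    rw [List.range_succ_eq_map]
    simp [List.map_map, Function.comp, List.take_succ_cons, List.append_assoc]

theorem truncLoopB (scheme : List Char) (parts' : List (List Char))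
    (hp : ∀ p ∈ parts', '/' ∉ p) :
    ∀ (j k : Nat) (out : List String), j ≤ k → k ≤ parts'.length →
    truncLoop j out (pvFull scheme parts' k)
    = out ++ ((List.range j).map (fun i => String.ofList (pvFull scheme parts' (i + (k - j) + 1)))).reverse := by
  intro j
  induction j with
  | zero => intro k out _ _; simp [truncLoop]
  | succ j ih =>
    intro k out hjk hk
    rw [truncLoop]
    rcases Nat.eq_zero_or_pos j with h0 | hpos
    · subst h0
      have hk1 : k - 1 + 1 = k := by omega
      simp [truncLoop, hk1]
    · have hk2 : 2 ≤ k := by omega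
      rw [rsplit_pvFull scheme parts' hp k hk2 hk]
      rw [ih (k - 1) (out ++ [String.ofList (pvFull scheme parts' k)]) (by omega) (by omega)]
      rw [List.range_succ, List.map_append, List.reverse_append]
      simp only [List.map_cons, List.map_nil, List.reverse_cons, List.reverse_nil,
        List.nil_append, List.cons_append, List.append_assoc]
      have h1 : j + (k - (j + 1)) + 1 = k := by omega
      have h2 : ∀ i : Nat, i + (k - 1 - j) + 1 = i + (k - (j + 1)) + 1 := by omega
      simp only [h1, h2]

-- ===== VERDICT (by name: the statement is the Claim_ definition above) =====
theorem parent_dir_paths_py_spec : Claim_equal_parent_dir_paths_py := by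
  intro path hdom hpre
  have hpre' : PySem.Str.isIn ":" path = true := hpre
  unfold Spec_parent_dir_paths_py parent_dir_paths_py parent_dir_paths_py_alt
  rw [if_pos hpre', if_pos hpre']
  cases hs : PySem.Chars.splitOnMax path.toList [':'] 1 with
  | nil => rfl
  | cons scheme rest =>
    cases rest with
    | nil => rfl
    | cons remainder rest2 =>
      cases rest2 with
      | cons _ _ => rfl
      | nil =>
        dsimp only
        set parts := (PySem.Chars.splitOn (remainder.dropWhile (fun c => c == '/')) ['/']).filter
          (fun p => !p.isEmpty) with hparts
        by_cases hlen : parts.length ≤ 1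
        · rw [if_pos hlen, if_pos hlen]
        · rw [if_neg hlen, if_neg hlen]
          have hp : ∀ p ∈ parts.dropLast, '/' ∉ p := by
            intro p hpmem
            exact splitOn_noSlash _ p
              (List.mem_of_mem_filter ((List.dropLast_sublist _).subset hpmem))
          have hn : parts.dropLast.length = parts.length - 1 := by
            simp [List.length_dropLast]
          have hfull : scheme ++ [':', '/'] ++ PySem.Chars.join ['/'] parts.dropLast
              = pvFull scheme parts.dropLast (parts.length - 1) := by
            unfold pvFull
            rw [← hn, List.take_length]
          rw [hfull, truncLoopB scheme parts.dropLast hp (parts.length - 1) (parts.length - 1)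
            [] (le_refl _) (by omega)]
          rw [foldA]
          simp only [List.nil_append, List.reverse_reverse, hn, Nat.sub_self, Nat.add_zero]
          unfold pvFull
          rfl
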